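-- pv_equiv track=rewrite | github.com/manav1125/suna | backend/core/tools/sb_presentation_tool.py | _choose_template_background_asset
-- ===== SOURCE A (Python) =====
-- from typing import List, Dict, Optional, Union, TYPE_CHECKING, Any
--
-- def _choose_template_background_asset(assets: List[str]) -> Optional[str]:
--     if not assets:
--         return None
--
--     preferred_keywords = ("gradient", "background", "hero", "cover", "texture", "bg")
--     scored_assets = []
--     for asset in assets:
--         lower = asset.lower()
--         if lower in {"image.png", "image.jpg", "image.jpeg", "preview.png", "preview.jpg", "preview.jpeg"}:
--             continue
--         score = 100
--         for index, keyword in enumerate(preferred_keywords):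
--             if keyword in lower:
--                 score = index
--                 break
--         scored_assets.append((score, asset))
--
--     if not scored_assets:
--         return None
--
--     scored_assets.sort(key=lambda item: (item[0], item[1]))
--     return scored_assets[0][1]
-- ===== SOURCE B (Python) =====
-- def _choose_template_background_asset(assets):
--     preferred_keywords = ("gradient", "background", "hero", "cover", "texture", "bg")
--     excluded = {"image.png", "image.jpg", "image.jpeg", "preview.png", "preview.jpg", "preview.jpeg"}
--     best = None
--     for asset in assets:
--         lower = asset.lower()
--         if lower in excluded:
--             continue
--         score = 100
--         for index, keyword in enumerate(preferred_keywords):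
--             if keyword in lower:
--                 score = index
--                 break
--         key = (score, asset)
--         if best is None or key < best:
--             best = key
--     return None if best is None else best[1]
-- ===== Notes on version B (the rewrite author's own statement) =====
-- stated objective: simpler
-- what changed: Replaces build-a-scored-list-then-sort-and-take-head with a single pass that keeps the lexicographically least (score, asset) pair seen so far and never materialises or sorts a list.
import Mathlib
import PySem

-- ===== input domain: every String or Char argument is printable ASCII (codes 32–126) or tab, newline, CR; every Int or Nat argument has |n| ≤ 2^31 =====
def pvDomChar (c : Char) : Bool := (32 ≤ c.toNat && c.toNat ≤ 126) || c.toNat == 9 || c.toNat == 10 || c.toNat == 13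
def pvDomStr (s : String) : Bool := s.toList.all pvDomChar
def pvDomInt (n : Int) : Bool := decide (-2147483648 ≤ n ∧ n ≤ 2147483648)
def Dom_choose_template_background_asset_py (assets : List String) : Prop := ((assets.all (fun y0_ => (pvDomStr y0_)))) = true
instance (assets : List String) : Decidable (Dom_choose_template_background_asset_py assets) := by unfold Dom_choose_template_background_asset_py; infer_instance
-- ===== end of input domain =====

-- B replaces A's build-scored-list-then-sort with a single pass keeping the least (score, asset) pair: simpler, no list or sort.


-- ===== PORT A =====
-- helpers shared by both ports: both Pythons contain this identical exclusion test and keyword-scoring loop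
def pvExcluded (lower : String) : Bool :=
  lower == "image.png" || lower == "image.jpg" || lower == "image.jpeg" ||
  lower == "preview.png" || lower == "preview.jpg" || lower == "preview.jpeg"

def pvKeywords : List String := ["gradient", "background", "hero", "cover", "texture", "bg"]

-- for index, keyword in enumerate(…): if keyword in lower: score = index; break  (else score stays 100)
def pvKeywordScore (i : Int) (kws : List String) (lower : String) : Int :=
  match kws with
  | [] => 100
  | k :: rest => if PySem.Str.isIn k lower then i else pvKeywordScore (i + 1) rest lower

def choose_template_background_asset_py (assets : List String) : Option String :=
  if assets = [] then none
  else
    let scored := assets.foldl (fun acc asset =>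
      let lower := PySem.Str.lower asset
      if pvExcluded lower then acc
      else acc ++ [(pvKeywordScore 0 pvKeywords lower, asset)]) []
    if scored = [] then none
    else
      match PySem.List.sorted2 scored Prod.fst Prod.snd with
      | [] => none
      | (_, a) :: _ => some a

-- ===== PORT B =====
def choose_template_background_asset_py_alt (assets : List String) : Option String :=
  let best := assets.foldl (fun best asset =>
    let lower := PySem.Str.lower asset
    if pvExcluded lower then best
    else
      let key := (pvKeywordScore 0 pvKeywords lower, asset)
      match best with
      | none => some key
      | some b => if key.1 < b.1 ∨ (key.1 = b.1 ∧ key.2 < b.2) then some key else some b) none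
  match best with
  | none => none
  | some b => some b.2

-- ===== PRECONDITION & SPEC =====
def Spec_choose_template_background_asset_py (assets : List String) (out : Option String) : Prop := out = choose_template_background_asset_py_alt assets
instance (assets : List String) (out : Option String) : Decidable (Spec_choose_template_background_asset_py assets out) := by unfold Spec_choose_template_background_asset_py; infer_instance

-- ===== CLAIM (what is proved, stated in full; the proofs are below) =====
def Claim_equal_choose_template_background_asset_py : Prop := ∀ (assets : List String), Dom_choose_template_background_asset_py assets → Spec_choose_template_background_asset_py assets (choose_template_background_asset_py assets)

-- ===== LEMMAS AND PROOFS =====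

-- the comparator sorted2 uses on (score, asset) pairs
def pvPLt (a b : Int × String) : Bool :=
  decide (a.1 < b.1) || !decide (b.1 < a.1) && decide (a.2 < b.2)

-- running minimum step on pairs
def pvStep (b : Option (Int × String)) (x : Int × String) : Option (Int × String) :=
  match b with
  | none => some x
  | some h => if pvPLt x h then some x else some h

lemma pvPLt_eq_decide (x h : Int × String) :
    pvPLt x h = decide (x.1 < h.1 ∨ (x.1 = h.1 ∧ x.2 < h.2)) := by
  unfold pvPLt
  rcases lt_trichotomy x.1 h.1 with h1 | h1 | h1
  · simp [h1, asymm h1]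
  · simp [h1]
  · simp [h1, asymm h1]
    intro he
    omega

lemma pvSorted2_eq (l : List (Int × String)) :
    PySem.List.sorted2 l Prod.fst Prod.snd =
      l.foldl (fun acc x => PySem.List.insertBy pvPLt x acc) [] := rfl

lemma head?_insertBy (x : Int × String) (acc : List (Int × String)) :
    (PySem.List.insertBy pvPLt x acc).head? = pvStep acc.head? x := by
  cases acc with
  | nil => simp [PySem.List.insertBy, pvStep]
  | cons h t =>
      simp only [PySem.List.insertBy, pvStep, List.head?]
      split_ifs with hb <;> simp

lemma head?_foldl_insertBy (l acc : List (Int × String)) :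
    (l.foldl (fun acc x => PySem.List.insertBy pvPLt x acc) acc).head? =
      l.foldl pvStep acc.head? := by
  induction l generalizing acc with
  | nil => rfl
  | cons x rest ih =>
      simp only [List.foldl_cons]
      rw [ih, head?_insertBy]

-- fusing A's list-building fold with the running-minimum fold gives B's single fold
lemma pvFuse (assets : List String) (pre : List (Int × String)) (b : Option (Int × String)) :
    ((assets.foldl (fun acc asset =>
        let lower := PySem.Str.lower asset
        if pvExcluded lower then acc
        else acc ++ [(pvKeywordScore 0 pvKeywords lower, asset)]) pre).foldl pvStep b) =
      assets.foldl (fun best asset =>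
        let lower := PySem.Str.lower asset
        if pvExcluded lower then best
        else pvStep best (pvKeywordScore 0 pvKeywords lower, asset)) (pre.foldl pvStep b) := by
  induction assets generalizing pre b with
  | nil => rfl
  | cons a rest ih =>
      simp only [List.foldl_cons]
      by_cases h : pvExcluded (PySem.Str.lower a)
      · simp only [h, if_true, ih]
      · simp only [h, Bool.false_eq_true, if_false]
        rw [ih, List.foldl_append, List.foldl_cons, List.foldl_nil]

lemma pvStep_some (b x : Int × String) :
    pvStep (some b) x = if x.1 < b.1 ∨ (x.1 = b.1 ∧ x.2 < b.2) then some x else some b := by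
  simp [pvStep, pvPLt_eq_decide]

-- B's fold body is pvStep after the skip test
lemma pvAltBody (assets : List String) (b : Option (Int × String)) :
    assets.foldl (fun best asset =>
        let lower := PySem.Str.lower asset
        if pvExcluded lower then best
        else
          let key := (pvKeywordScore 0 pvKeywords lower, asset)
          match best with
          | none => some key
          | some bb => if key.1 < bb.1 ∨ (key.1 = bb.1 ∧ key.2 < bb.2) then some key else some bb) b =
      assets.foldl (fun best asset =>
        let lower := PySem.Str.lower asset
        if pvExcluded lower then best
        else pvStep best (pvKeywordScore 0 pvKeywords lower, asset)) b := by
  induction assets generalizing b with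
  | nil => rfl
  | cons a rest ih =>
      simp only [List.foldl_cons]
      rw [ih]
      congr 1
      by_cases h : pvExcluded (PySem.Str.lower a)
      · simp [h]
      · cases b with
        | none => simp [h, pvStep]
        | some bb => simp [h, pvStep_some]

-- ===== VERDICT (by name: the statement is the Claim_ definition above) =====
theorem choose_template_background_asset_py_spec : Claim_equal_choose_template_background_asset_py := by
  intro assets _
  unfold Spec_choose_template_background_asset_py
  unfold choose_template_background_asset_py choose_template_background_asset_py_alt
  by_cases h0 : assets = []
  · simp [h0]
  · simp only [h0, if_false]
    rw [pvAltBody]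
    have hF := pvFuse assets [] none
    simp only [List.foldl_nil] at hF
    rw [← hF]
    have hM : (PySem.List.sorted2 (assets.foldl (fun acc asset =>
        let lower := PySem.Str.lower asset
        if pvExcluded lower then acc
        else acc ++ [(pvKeywordScore 0 pvKeywords lower, asset)]) []) Prod.fst Prod.snd).head? =
        (assets.foldl (fun acc asset =>
        let lower := PySem.Str.lower asset
        if pvExcluded lower then acc
        else acc ++ [(pvKeywordScore 0 pvKeywords lower, asset)]) []).foldl pvStep none := by
      rw [pvSorted2_eq, head?_foldl_insertBy]; rfl
    set scored := assets.foldl (fun acc asset =>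
        let lower := PySem.Str.lower asset
        if pvExcluded lower then acc
        else acc ++ [(pvKeywordScore 0 pvKeywords lower, asset)]) [] with hsc
    by_cases hs : scored = []
    · simp only [hs, if_true, List.foldl_nil]
    · simp only [hs, if_false]
      cases hc : scored.foldl pvStep none with
      | none =>
          rw [hc] at hM
          have : PySem.List.sorted2 scored Prod.fst Prod.snd = [] := by
            cases h : PySem.List.sorted2 scored Prod.fst Prod.snd with
            | nil => rfl
            | cons p t => rw [h] at hM; simp at hM
          rw [this]
      | some p =>
          rw [hc] at hM
          cases h : PySem.List.sorted2 scored Prod.fst Prod.snd with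
          | nil => rw [h] at hM; simp at hM
          | cons q t =>
              rw [h] at hM
              simp only [List.head?] at hM
              obtain rfl : q = p := by injection hM
              rfl
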